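-- pv_equiv track=rewrite | github.com/mateon1/pmd-red | scripts/compress.py | precomp_prev_match
-- ===== SOURCE A (Python) =====
-- def precomp_prev_match(data):
--     _bytes = type(b"")
--     data = _bytes(data) # Need hashability of bytes/str type
--     last = [{} for i in range(16)]
--     refs = [[] for i in range(16)]
--     for i in range(len(data)):
--         for r in range(16):
--             l = r + 3
--             base = i - l + 1
--             if base < 0:
--                 refs[r].append(-1)
--                 continue
--             s = data[base:base+l]
--             if s not in last[r]:
--                 last[r][s] = base
--                 refs[r].append(-1)
--                 continue
--             lb = last[r][s]
--             refs[r].append(lb)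
--             last[r][s] = base
--     return refs
-- ===== SOURCE B (Python) =====
-- def precomp_prev_match(data):
--     _bytes = type(b"")
--     data = _bytes(data)  # Need hashability of bytes/str type
--     n = len(data)
--     refs = []
--     for r in range(16):
--         l = r + 3
--         # Phase 1: group valid bases (ascending) by their substring.
--         groups = {}
--         for i in range(n):
--             base = i - l + 1
--             if base >= 0:
--                 groups.setdefault(data[base:base + l], []).append(base)
--         # Phase 2: predecessor links within each group (first gets -1).
--         prev = {}
--         for bases in groups.values():
--             p = -1
--             for b in bases:
--                 prev[b] = p
--                 p = b
--         # Phase 3: assemble the row.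
--         row = []
--         for i in range(n):
--             base = i - l + 1
--             row.append(-1 if base < 0 else prev[base])
--         refs.append(row)
--     return refs
-- ===== Notes on version B (the rewrite author's own statement) =====
-- stated objective: alternative
-- what changed: Replaced A's online last-seen-dict scan (one dict per length, updated while emitting) by a three-phase pipeline per length: group all valid bases by substring, precompute a base->previous-base link dict per group, then assemble the row by lookup.
import Mathlib
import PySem

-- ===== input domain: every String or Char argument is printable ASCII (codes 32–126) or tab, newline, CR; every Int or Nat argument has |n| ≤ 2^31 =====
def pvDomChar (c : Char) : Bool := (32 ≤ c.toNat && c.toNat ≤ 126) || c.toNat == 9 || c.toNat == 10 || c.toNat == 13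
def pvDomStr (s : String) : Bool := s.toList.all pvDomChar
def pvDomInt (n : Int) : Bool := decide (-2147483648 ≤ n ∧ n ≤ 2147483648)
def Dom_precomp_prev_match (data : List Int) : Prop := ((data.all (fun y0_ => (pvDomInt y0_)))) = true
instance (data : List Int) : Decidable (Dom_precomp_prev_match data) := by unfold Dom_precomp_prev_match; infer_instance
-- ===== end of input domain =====

-- B replaces A's online last-seen-dict scan by a three-phase pipeline per length
-- (group bases by substring, precompute predecessor links, assemble); same cost, alternative structure.


-- ===== PORT A =====
-- data = bytes(data): under Pre_ (every element in 0..255) the conversion keeps the values,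
-- so slices of the bytes are modelled exactly by List Int slices used as dict keys.
def precomp_prev_match (data : List Int) : List (List Int) :=
  let last0 : List (PySem.Dict (List Int) Int) := List.replicate 16 PySem.Dict.empty
  let refs0 : List (List Int) := List.replicate 16 []
  let st := (List.range data.length).foldl (fun st (i : Nat) =>
      (List.range 16).foldl (fun (st : List (PySem.Dict (List Int) Int) × List (List Int)) (r : Nat) =>
        let l : Int := (r : Int) + 3
        let base : Int := (i : Int) - l + 1
        if base < 0 then
          (st.1, st.2.set r (st.2.getD r [] ++ [-1]))
        else
          let s := PySem.List.slice data base (base + l)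
          match (st.1.getD r PySem.Dict.empty).get? s with
          | none =>
            (st.1.set r ((st.1.getD r PySem.Dict.empty).insert s base),
             st.2.set r (st.2.getD r [] ++ [-1]))
          | some lb =>
            (st.1.set r ((st.1.getD r PySem.Dict.empty).insert s base),
             st.2.set r (st.2.getD r [] ++ [lb]))) st)
    (last0, refs0)
  st.2

-- ===== PORT B =====
-- Phase 1: groups.setdefault(data[base:base+l], []).append(base)  ==  d[s] = d.get(s, []) + [base]  (Dict.modify)
def pvGroups (data : List Int) (l : Int) : PySem.Dict (List Int) (List Int) :=
  (List.range data.length).foldl (fun g (i : Nat) =>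
    let base : Int := (i : Int) - l + 1
    if base ≥ 0 then
      g.modify (PySem.List.slice data base (base + l)) [] (· ++ [base])
    else g) PySem.Dict.empty

-- Phase 2: predecessor links within each group (first gets -1)
def pvPrev (groups : PySem.Dict (List Int) (List Int)) : PySem.Dict Int Int :=
  groups.values.foldl (fun pv bs =>
    (bs.foldl (fun (st : PySem.Dict Int Int × Int) b => (st.1.insert b st.2, b)) (pv, -1)).1)
    PySem.Dict.empty

-- Phase 3: prev[base] — the key is always present (phase 1 inserted every valid base)
def pvRow (data : List Int) (l : Int) (prev : PySem.Dict Int Int) : List Int :=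
  (List.range data.length).foldl (fun row (i : Nat) =>
    let base : Int := (i : Int) - l + 1
    row ++ [if base < 0 then -1 else (prev.get? base).getD 0]) []

def precomp_prev_match_alt (data : List Int) : List (List Int) :=
  (List.range 16).foldl (fun refs (r : Nat) =>
    let l : Int := (r : Int) + 3
    refs ++ [pvRow data l (pvPrev (pvGroups data l))]) []

-- ===== PRECONDITION & SPEC =====
-- Pre_ excludes exactly the inputs where bytes(data) raises (an element outside 0..255); both A and B raise there.
def Pre_precomp_prev_match (data : List Int) : Prop := ∀ x ∈ data, 0 ≤ x ∧ x < 256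
instance (data : List Int) : Decidable (Pre_precomp_prev_match data) := by unfold Pre_precomp_prev_match; infer_instance

def pvWitness_precomp_prev_match : List Int := [1, 1, 1, 1, 1]

def Spec_precomp_prev_match (data : List Int) (out : List (List Int)) : Prop := out = precomp_prev_match_alt data
instance (data : List Int) (out : List (List Int)) : Decidable (Spec_precomp_prev_match data out) := by unfold Spec_precomp_prev_match; infer_instance

-- ===== CLAIM (what is proved, stated in full; the proofs are below) =====
def Claim_equal_precomp_prev_match : Prop := ∀ (data : List Int), Dom_precomp_prev_match data → Pre_precomp_prev_match data → Spec_precomp_prev_match data (precomp_prev_match data)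

-- ===== LEMMAS AND PROOFS =====

def pvB (l : Int) (i : Nat) : Int := (i : Int) - l + 1

def pvS (data : List Int) (l : Int) (b : Int) : List Int := PySem.List.slice data b (b + l)

-- the list of valid bases (in position order) whose substring of length l equals s, among positions i < k
def pvOcc (data : List Int) (l : Int) (k : Nat) (s : List Int) : List Int :=
  (List.range k).filterMap (fun (i : Nat) =>
    if 0 ≤ pvB l i ∧ pvS data l (pvB l i) = s then some (pvB l i) else none)

-- the value both programs emit at position i (for row r, l = r+3)
def pvSpecAt (data : List Int) (l : Int) (i : Nat) : Int :=
  if pvB l i < 0 then -1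
  else ((pvOcc data l i (pvS data l (pvB l i))).getLast?).getD (-1)

-- per-r reading of A's inner step, on a plain pair
def pvStepA (data : List Int) (l : Int) (st : PySem.Dict (List Int) Int × List Int) (i : Nat) :
    PySem.Dict (List Int) Int × List Int :=
  if pvB l i < 0 then (st.1, st.2 ++ [-1])
  else (st.1.insert (pvS data l (pvB l i)) (pvB l i),
        st.2 ++ [(st.1.get? (pvS data l (pvB l i))).getD (-1)])

def pvFoldA (data : List Int) (l : Int) (k : Nat) : PySem.Dict (List Int) Int × List Int :=
  (List.range k).foldl (pvStepA data l) (PySem.Dict.empty, [])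

-- A's inner (over r) loop body, as a named function (definitionally the port's lambda)
def pvBodyA (data : List Int) (i : Nat)
    (st : List (PySem.Dict (List Int) Int) × List (List Int)) (r : Nat) :
    List (PySem.Dict (List Int) Int) × List (List Int) :=
  let l : Int := (r : Int) + 3
  let base : Int := (i : Int) - l + 1
  if base < 0 then
    (st.1, st.2.set r (st.2.getD r [] ++ [-1]))
  else
    let s := PySem.List.slice data base (base + l)
    match (st.1.getD r PySem.Dict.empty).get? s with
    | none =>
      (st.1.set r ((st.1.getD r PySem.Dict.empty).insert s base),
       st.2.set r (st.2.getD r [] ++ [-1]))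
    | some lb =>
      (st.1.set r ((st.1.getD r PySem.Dict.empty).insert s base),
       st.2.set r (st.2.getD r [] ++ [lb]))

-- predecessor of b in a list, seeded with p
def pvPrevIn (p : Int) : List Int → Int → Option Int
  | [], _ => none
  | x :: xs, b => if b = x then some p else pvPrevIn x xs b

-- ---- pvOcc basics ----

theorem pvOcc_succ (data : List Int) (l : Int) (k : Nat) (s : List Int) :
    pvOcc data l (k+1) s = pvOcc data l k s ++
      (if 0 ≤ pvB l k ∧ pvS data l (pvB l k) = s then [pvB l k] else []) := by
  unfold pvOcc
  rw [List.range_succ, List.filterMap_append]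
  congr 1
  by_cases hc : 0 ≤ pvB l k ∧ pvS data l (pvB l k) = s
  · simp [hc]
  · simp [hc]

theorem mem_pvOcc {data : List Int} {l : Int} {k : Nat} {s : List Int} {b : Int}
    (h : b ∈ pvOcc data l k s) :
    ∃ i : Nat, i < k ∧ b = pvB l i ∧ 0 ≤ b ∧ pvS data l b = s := by
  unfold pvOcc at h
  rcases List.mem_filterMap.1 h with ⟨i, hi, hf⟩
  split at hf
  · rename_i hcond
    cases hf
    exact ⟨i, List.mem_range.1 hi, rfl, hcond.1, hcond.2⟩
  · cases hf

theorem pvOcc_lt {data : List Int} {l : Int} {k : Nat} {s : List Int} {b : Int}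
    (h : b ∈ pvOcc data l k s) : b < pvB l k := by
  obtain ⟨i, hik, rfl, -, -⟩ := mem_pvOcc h
  have : (i : Int) < (k : Int) := by exact_mod_cast hik
  unfold pvB
  omega

theorem pvOcc_prefix (data : List Int) (l : Int) (s : List Int) (k k' : Nat) (h : k ≤ k') :
    ∃ zs, pvOcc data l k' s = pvOcc data l k s ++ zs := by
  induction k' with
  | zero =>
    have : k = 0 := Nat.le_zero.1 h
    subst this; exact ⟨[], rfl⟩
  | succ k' ih =>
    rcases Nat.eq_or_lt_of_le h with heq | hlt
    · exact ⟨[], by rw [heq, List.append_nil]⟩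
    · obtain ⟨zs, hz⟩ := ih (Nat.lt_succ_iff.1 hlt)
      exact ⟨zs ++ _, by rw [pvOcc_succ, hz, List.append_assoc]⟩

theorem pvOcc_pairwise (data : List Int) (l : Int) (k : Nat) (s : List Int) :
    (pvOcc data l k s).Pairwise (· < ·) := by
  induction k with
  | zero => exact List.Pairwise.nil
  | succ k ih =>
    rw [pvOcc_succ, List.pairwise_append]
    refine ⟨ih, by split <;> simp, ?_⟩
    intro a ha b hb
    have hlt := pvOcc_lt ha
    split at hb
    · rcases List.mem_singleton.1 hb with rfl
      exact hlt
    · cases hb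

theorem pvOcc_nodup (data : List Int) (l : Int) (k : Nat) (s : List Int) :
    (pvOcc data l k s).Nodup :=
  (pvOcc_pairwise data l k s).imp (fun h => ne_of_lt h)

-- ---- A side: the per-r fold computes pvSpecAt ----

theorem pvFoldA_succ (data : List Int) (l : Int) (k : Nat) :
    pvFoldA data l (k+1) = pvStepA data l (pvFoldA data l k) k := by
  unfold pvFoldA
  rw [List.range_succ, List.foldl_append]
  rfl

theorem pvFoldA_spec (data : List Int) (l : Int) (k : Nat) :
    (∀ s, (pvFoldA data l k).1.get? s = (pvOcc data l k s).getLast?) ∧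
      (pvFoldA data l k).2 = (List.range k).map (pvSpecAt data l) := by
  induction k with
  | zero =>
    refine ⟨fun s => ?_, rfl⟩
    simp [pvFoldA, pvOcc, PySem.Dict.get?_empty]
  | succ k ih =>
    obtain ⟨ihd, ihr⟩ := ih
    rw [pvFoldA_succ]
    unfold pvStepA
    by_cases hb : pvB l k < 0
    · rw [if_pos hb]
      constructor
      · intro s
        rw [ihd s, pvOcc_succ, if_neg (fun hc => absurd hc.1 (by omega)),
            List.append_nil]
      · rw [List.range_succ, List.map_append, ihr]
        simp [pvSpecAt, hb]
    · rw [if_neg hb]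
      have h0 : 0 ≤ pvB l k := by omega
      constructor
      · intro s
        by_cases hss : s = pvS data l (pvB l k)
        · subst hss
          rw [PySem.Dict.get?_insert_self, pvOcc_succ, if_pos ⟨h0, rfl⟩, List.getLast?_concat]
        · rw [PySem.Dict.get?_insert_of_ne _ _ hss, ihd s, pvOcc_succ,
              if_neg (fun hc => hss hc.2.symm), List.append_nil]
      · rw [List.range_succ, List.map_append, ihr]
        have hspec : pvSpecAt data l k = ((pvFoldA data l k).1.get? (pvS data l (pvB l k))).getD (-1) := by
          rw [ihd]
          simp [pvSpecAt, hb]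
        simp [hspec]

-- ---- A side: the 16-slot double loop is 16 independent per-r folds ----

theorem pv_set_map_range {α : Type} (g : Nat → α) (m r : Nat) (v : α) (_h : r < m) :
    ((List.range m).map g).set r v = (List.range m).map (fun r' => if r' = r then v else g r') := by
  apply List.ext_getElem
  · simp
  · intro n h1 h2
    simp only [List.getElem_set, List.getElem_map, List.getElem_range]
    split_ifs with h3 h4 h5
    · rfl
    · exact absurd h3.symm h4
    · exact absurd h5.symm h3
    · rfl

theorem pvBodyA_on_maps (data : List Int) (i : Nat)
    (g1 : Nat → PySem.Dict (List Int) Int) (g2 : Nat → List Int) (m : Nat) (hm : m < 16) :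
    pvBodyA data i ((List.range 16).map g1, (List.range 16).map g2) m =
      ((List.range 16).map (fun r => if r = m then (pvStepA data ((m : Int) + 3) (g1 m, g2 m) i).1 else g1 r),
       (List.range 16).map (fun r => if r = m then (pvStepA data ((m : Int) + 3) (g1 m, g2 m) i).2 else g2 r)) := by
  simp only [pvBodyA, pvStepA, pvB, pvS]
  rw [PySem.List.getD_map_range g1 16 m PySem.Dict.empty hm,
      PySem.List.getD_map_range g2 16 m [] hm]
  by_cases hb : ((i : Int) - ((m : Int) + 3) + 1) < 0
  · rw [if_pos hb, if_pos hb]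
    rw [pv_set_map_range g2 16 m _ hm]
    refine Prod.ext ?_ ?_ <;> dsimp only <;>
      · apply List.map_congr_left
        intro r hr
        by_cases hrm : r = m <;> simp [hrm]
  · rw [if_neg hb, if_neg hb]
    split <;> rename_i heq <;>
      rw [heq, pv_set_map_range g1 16 m _ hm, pv_set_map_range g2 16 m _ hm] <;>
      refine Prod.ext ?_ ?_ <;> dsimp only <;>
      · apply List.map_congr_left
        intro r hr
        by_cases hrm : r = m <;> simp [hrm]

theorem pvBodyA_fold_maps (data : List Int) (i : Nat)
    (f1 : Nat → PySem.Dict (List Int) Int) (f2 : Nat → List Int) :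
    ∀ (m : Nat), m ≤ 16 →
    (List.range m).foldl (pvBodyA data i) ((List.range 16).map f1, (List.range 16).map f2) =
      ((List.range 16).map (fun r => if r < m then (pvStepA data ((r : Int) + 3) (f1 r, f2 r) i).1 else f1 r),
       (List.range 16).map (fun r => if r < m then (pvStepA data ((r : Int) + 3) (f1 r, f2 r) i).2 else f2 r)) := by
  intro m
  induction m with
  | zero => intro _; simp
  | succ m ih =>
    intro hm
    have hmlt : m < 16 := hm
    rw [List.range_succ (n := m), List.foldl_append, ih (Nat.le_of_lt hm)]
    simp only [List.foldl_cons, List.foldl_nil]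
    rw [pvBodyA_on_maps data i _ _ m hmlt]
    simp only [if_neg (lt_irrefl m)]
    simp only [Prod.mk.injEq]
    constructor
    · apply List.map_congr_left
      intro r hr
      by_cases hrm : r = m
      · subst hrm; simp
      · by_cases hrlt : r < m
        · simp [hrm, hrlt, Nat.lt_succ_of_lt hrlt]
        · have : ¬ r < m + 1 := by omega
          simp [hrm, hrlt, this]
    · apply List.map_congr_left
      intro r hr
      by_cases hrm : r = m
      · subst hrm; simp
      · by_cases hrlt : r < m
        · simp [hrm, hrlt, Nat.lt_succ_of_lt hrlt]
        · have : ¬ r < m + 1 := by omega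
          simp [hrm, hrlt, this]

theorem portA_fold (data : List Int) (k : Nat) :
    (List.range k).foldl (fun st (i : Nat) => (List.range 16).foldl (pvBodyA data i) st)
      (List.replicate 16 PySem.Dict.empty, List.replicate 16 ([] : List Int)) =
    ((List.range 16).map (fun (r : Nat) => (pvFoldA data ((r : Int) + 3) k).1),
     (List.range 16).map (fun (r : Nat) => (pvFoldA data ((r : Int) + 3) k).2)) := by
  induction k with
  | zero =>
    simp only [List.range_zero, List.foldl_nil]
    simp only [Prod.mk.injEq]
    constructor <;>
      · show List.replicate 16 _ = _
        rw [show (16 : Nat) = (List.range 16).length by simp, ← List.map_const']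
        rfl
  | succ k ih =>
    rw [List.range_succ (n := k), List.foldl_append, ih]
    simp only [List.foldl_cons, List.foldl_nil]
    rw [pvBodyA_fold_maps data k _ _ 16 le_rfl]
    simp only [Prod.mk.injEq]
    constructor <;>
      · apply List.map_congr_left
        intro r hr
        rw [if_pos (List.mem_range.1 hr), pvFoldA_succ]

theorem portA_rows (data : List Int) :
    precomp_prev_match data =
      (List.range 16).map (fun (r : Nat) => (List.range data.length).map (pvSpecAt data ((r : Int) + 3))) := by
  have h : precomp_prev_match data =
      ((List.range data.length).foldl (fun st (i : Nat) => (List.range 16).foldl (pvBodyA data i) st)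
        (List.replicate 16 PySem.Dict.empty, List.replicate 16 ([] : List Int))).2 := rfl
  rw [h, portA_fold]
  apply List.map_congr_left
  intro r _
  exact (pvFoldA_spec data ((r : Int) + 3) data.length).2

-- ---- B side ----

theorem pvOcc_pairs (data : List Int) (l : Int) (s : List Int) (L : List Nat) :
    (((L.filter (fun (i : Nat) => decide (0 ≤ pvB l i))).map
        (fun (i : Nat) => (pvS data l (pvB l i), pvB l i))).filter (fun p => p.1 == s)).map (fun p => p.2)
    = L.filterMap (fun (i : Nat) =>
        if 0 ≤ pvB l i ∧ pvS data l (pvB l i) = s then some (pvB l i) else none) := by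
  induction L with
  | nil => rfl
  | cons i L ih =>
    simp only [List.filter_cons, List.filterMap_cons]
    by_cases h0 : 0 ≤ pvB l i
    · rw [if_pos (decide_eq_true h0)]
      simp only [List.map_cons, List.filter_cons]
      by_cases hs : pvS data l (pvB l i) = s
      · rw [if_pos (by simpa using hs), if_pos ⟨h0, hs⟩]
        simp only [List.map_cons]
        rw [ih]
      · rw [if_neg (by simpa using hs), if_neg (fun hc => hs hc.2), ih]
    · rw [if_neg (by simpa using h0), if_neg (fun hc => h0 hc.1), ih]

theorem pvGroups_getD (data : List Int) (l : Int) (s : List Int) :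
    (pvGroups data l).getD s [] = pvOcc data l data.length s := by
  have hdef : pvGroups data l = (List.range data.length).foldl
      (fun g (i : Nat) => if 0 ≤ pvB l i then g.modify (pvS data l (pvB l i)) [] (· ++ [pvB l i]) else g)
      PySem.Dict.empty := rfl
  rw [hdef, PySem.List.foldl_ite_eq_foldl_filter (p := fun (i : Nat) => 0 ≤ pvB l i)]
  rw [show (fun (g : PySem.Dict (List Int) (List Int)) (i : Nat) =>
        g.modify (pvS data l (pvB l i)) [] (· ++ [pvB l i])) =
      (fun (g : PySem.Dict (List Int) (List Int)) (i : Nat) =>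
        g.modify ((fun (j : Nat) => (pvS data l (pvB l j), pvB l j)) i).1 []
          (· ++ [((fun (j : Nat) => (pvS data l (pvB l j), pvB l j)) i).2])) from rfl]
  rw [← List.foldl_map (f := fun (j : Nat) => (pvS data l (pvB l j), pvB l j))
        (g := fun (d : PySem.Dict (List Int) (List Int)) p => d.modify p.1 [] (· ++ [p.2]))]
  rw [PySem.Dict.getD_foldl_modify_append, PySem.Dict.getD_empty, List.nil_append]
  rw [pvOcc_pairs]
  rfl

theorem pvGroups_keys_nodup (data : List Int) (l : Int) : (pvGroups data l).keys.Nodup := by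
  have hdef : pvGroups data l = (List.range data.length).foldl
      (fun g (i : Nat) => if 0 ≤ pvB l i then g.modify (pvS data l (pvB l i)) [] (· ++ [pvB l i]) else g)
      PySem.Dict.empty := rfl
  rw [hdef, PySem.List.foldl_ite_eq_foldl_filter (p := fun (i : Nat) => 0 ≤ pvB l i)]
  exact PySem.Dict.nodup_keys_foldl_modify_key _ (fun (i : Nat) => pvS data l (pvB l i)) []
    (fun d (i : Nat) => (· ++ [pvB l i])) _ PySem.Dict.nodup_keys_empty

theorem pvGroups_values (data : List Int) (l : Int) {bs : List Int}
    (h : bs ∈ (pvGroups data l).values) : ∃ s, bs = pvOcc data l data.length s := by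
  rw [PySem.Dict.values_eq_map_keys _ (pvGroups_keys_nodup data l) []] at h
  rcases List.mem_map.1 h with ⟨s, -, rfl⟩
  exact ⟨s, pvGroups_getD data l s⟩

theorem pvGroups_mem_values (data : List Int) (l : Int) (s : List Int)
    (hne : pvOcc data l data.length s ≠ []) :
    pvOcc data l data.length s ∈ (pvGroups data l).values := by
  have hc : (pvGroups data l).contains s = true := by
    by_contra hc'
    have hfalse : (pvGroups data l).contains s = false := by
      cases h : (pvGroups data l).contains s
      · rfl
      · exact absurd h hc'
    have := PySem.Dict.getD_of_not_contains (pvGroups data l) ([] : List Int) hfalse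
    rw [pvGroups_getD] at this
    exact hne this
  have hk : s ∈ (pvGroups data l).keys := (PySem.Dict.contains_iff_mem_keys _ _).1 hc
  rw [PySem.Dict.values_eq_map_keys _ (pvGroups_keys_nodup data l) []]
  exact List.mem_map.2 ⟨s, hk, pvGroups_getD data l s⟩

theorem pvFoldIns_not_mem (bs : List Int) (pv : PySem.Dict Int Int) (p b : Int) (h : b ∉ bs) :
    ((bs.foldl (fun (st : PySem.Dict Int Int × Int) b => (st.1.insert b st.2, b)) (pv, p)).1).get? b = pv.get? b := by
  induction bs generalizing pv p with
  | nil => rfl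
  | cons x xs ih =>
    rw [List.foldl_cons]
    have hx : b ≠ x := fun he => h (he ▸ List.mem_cons_self)
    rw [ih (pv.insert x p) x (fun hm => h (List.mem_cons_of_mem x hm)),
        PySem.Dict.get?_insert_of_ne _ _ hx]

theorem pvFoldIns_mem (bs : List Int) (pv : PySem.Dict Int Int) (p b : Int)
    (hnd : bs.Nodup) (h : b ∈ bs) :
    ((bs.foldl (fun (st : PySem.Dict Int Int × Int) b => (st.1.insert b st.2, b)) (pv, p)).1).get? b = pvPrevIn p bs b := by
  induction bs generalizing pv p with
  | nil => cases h
  | cons x xs ih =>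
    rw [List.foldl_cons]
    have hxs : x ∉ xs := (List.nodup_cons.1 hnd).1
    have hnd' : xs.Nodup := (List.nodup_cons.1 hnd).2
    by_cases hbx : b = x
    · subst hbx
      rw [pvFoldIns_not_mem xs _ _ _ hxs, PySem.Dict.get?_insert_self]
      simp [pvPrevIn]
    · have hbxs : b ∈ xs := (List.mem_cons.1 h).resolve_left hbx
      rw [ih (pv.insert x p) x hnd' hbxs]
      simp [pvPrevIn, hbx]

theorem pvPrev_fold_not_mem (vs : List (List Int)) (pv : PySem.Dict Int Int) (b : Int)
    (h : ∀ bs ∈ vs, b ∉ bs) :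
    ((vs.foldl (fun pv bs =>
        (bs.foldl (fun (st : PySem.Dict Int Int × Int) b => (st.1.insert b st.2, b)) (pv, -1)).1) pv)).get? b
      = pv.get? b := by
  induction vs generalizing pv with
  | nil => rfl
  | cons bs vs ih =>
    rw [List.foldl_cons, ih _ (fun bs' h' => h bs' (List.mem_cons_of_mem bs h')),
        pvFoldIns_not_mem bs pv (-1) b (h bs (List.mem_cons_self))]

theorem pvPrev_fold_mem (vs : List (List Int)) (pv : PySem.Dict Int Int) (b v : Int)
    (h : ∀ bs ∈ vs, b ∈ bs → bs.Nodup ∧ pvPrevIn (-1) bs b = some v)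
    (hex : ∃ bs ∈ vs, b ∈ bs) :
    ((vs.foldl (fun pv bs =>
        (bs.foldl (fun (st : PySem.Dict Int Int × Int) b => (st.1.insert b st.2, b)) (pv, -1)).1) pv)).get? b
      = some v := by
  induction vs generalizing pv with
  | nil => rcases hex with ⟨bs, hmem, -⟩; cases hmem
  | cons bs vs ih =>
    rw [List.foldl_cons]
    by_cases hrest : ∃ bs' ∈ vs, b ∈ bs'
    · exact ih _ (fun bs' h' hb => h bs' (List.mem_cons_of_mem bs h') hb) hrest
    · have hrest' : ∀ bs' ∈ vs, b ∉ bs' := fun bs' h' hb' => hrest ⟨bs', h', hb'⟩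
      have hb : b ∈ bs := by
        rcases hex with ⟨bs', hmem, hb'⟩
        rcases List.mem_cons.1 hmem with rfl | htl
        · exact hb'
        · exact absurd hb' (hrest' bs' htl)
      obtain ⟨hnd, hpi⟩ := h bs (List.mem_cons_self) hb
      rw [pvPrev_fold_not_mem vs _ b hrest', pvFoldIns_mem bs pv (-1) b hnd hb, hpi]

theorem pvPrevIn_split (xs ys : List Int) (b p : Int) (h : b ∉ xs) :
    pvPrevIn p (xs ++ b :: ys) b = some ((xs.getLast?).getD p) := by
  induction xs generalizing p with
  | nil => simp [pvPrevIn]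
  | cons x xs ih =>
    have hbx : b ≠ x := fun he => h (he ▸ List.mem_cons_self)
    have hbxs : b ∉ xs := fun hm => h (List.mem_cons_of_mem x hm)
    rw [List.cons_append]
    show (if b = x then some p else pvPrevIn x (xs ++ b :: ys) b) = _
    rw [if_neg hbx, ih x hbxs]
    cases xs with
    | nil => simp
    | cons y ys' =>
      simp only [List.getLast?_cons_cons]
      rcases h' : (y :: ys').getLast? with _ | v
      · simp [List.getLast?_eq_none_iff] at h'
      · simp

theorem pvPrev_get? (data : List Int) (l : Int) (i : Nat) (hi : i < data.length)
    (h0 : 0 ≤ pvB l i) :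
    (pvPrev (pvGroups data l)).get? (pvB l i) =
      some (((pvOcc data l i (pvS data l (pvB l i))).getLast?).getD (-1)) := by
  have hsucc : pvOcc data l (i+1) (pvS data l (pvB l i))
      = pvOcc data l i (pvS data l (pvB l i)) ++ [pvB l i] := by
    rw [pvOcc_succ, if_pos ⟨h0, rfl⟩]
  obtain ⟨zs, hz⟩ := pvOcc_prefix data l (pvS data l (pvB l i)) (i+1) data.length hi
  have hsplit : pvOcc data l data.length (pvS data l (pvB l i))
      = pvOcc data l i (pvS data l (pvB l i)) ++ pvB l i :: zs := by
    rw [hz, hsucc, List.append_assoc]; rfl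
  have hnotmem : pvB l i ∉ pvOcc data l i (pvS data l (pvB l i)) :=
    fun hmem => absurd (pvOcc_lt hmem) (by simp [pvB])
  have hbmem : pvB l i ∈ pvOcc data l data.length (pvS data l (pvB l i)) := by
    rw [hsplit]; simp
  unfold pvPrev
  apply pvPrev_fold_mem
  · intro bs hbs hb
    obtain ⟨t, rfl⟩ := pvGroups_values data l hbs
    obtain ⟨i', -, -, -, hs⟩ := mem_pvOcc hb
    have hss : t = pvS data l (pvB l i) := hs.symm
    subst hss
    refine ⟨pvOcc_nodup _ _ _ _, ?_⟩
    rw [hsplit]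
    exact pvPrevIn_split _ _ _ _ hnotmem
  · refine ⟨_, pvGroups_mem_values data l _ (fun he => ?_), hbmem⟩
    rw [he] at hbmem; cases hbmem

theorem pvRow_eq (data : List Int) (l : Int) :
    pvRow data l (pvPrev (pvGroups data l)) = (List.range data.length).map (pvSpecAt data l) := by
  have hdef : pvRow data l (pvPrev (pvGroups data l)) = (List.range data.length).foldl
      (fun row (i : Nat) =>
        row ++ [if pvB l i < 0 then -1 else ((pvPrev (pvGroups data l)).get? (pvB l i)).getD 0]) [] := rfl
  rw [hdef, PySem.List.foldl_append_singleton_eq_map, List.nil_append]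
  apply List.map_congr_left
  intro i hi
  by_cases hb : pvB l i < 0
  · simp [pvSpecAt, hb]
  · rw [if_neg hb, pvPrev_get? data l i (List.mem_range.1 hi) (by omega)]
    simp [pvSpecAt, hb]

theorem pv_main (data : List Int) :
    precomp_prev_match data = precomp_prev_match_alt data := by
  have hAlt : precomp_prev_match_alt data =
      (List.range 16).foldl (fun refs (r : Nat) =>
        refs ++ [pvRow data ((r : Int) + 3) (pvPrev (pvGroups data ((r : Int) + 3)))]) [] := rfl
  rw [portA_rows, hAlt, PySem.List.foldl_append_singleton_eq_map, List.nil_append]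
  apply List.map_congr_left
  intro r _
  rw [pvRow_eq]

-- ===== VERDICT (by name: the statement is the Claim_ definition above) =====
theorem precomp_prev_match_spec : Claim_equal_precomp_prev_match := by
  intro data _ _
  unfold Spec_precomp_prev_match
  exact pv_main data
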